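-- pv_equiv track=rewrite | github.com/Vinu1602/SPPU-ResultAnalysi | DataManipulation.py | clarifyStudentYearWise
-- ===== SOURCE A (Python) =====
-- def clarifyStudentYearWise(newPerfectData):
--     regularStudent = [[]]
--     studentLengthList = []
--     studentLengthList.append(len(newPerfectData[0]))
--     for i in newPerfectData:
--         if(len(i)==studentLengthList[-1]):
--             regularStudent[-1].append(i)
--         else:
--             studentLengthList.append(len(i))
--             regularStudent.append([i])
--     return regularStudent
-- ===== SOURCE B (Python) =====
-- def clarifyStudentYearWise(newPerfectData):
--     result = []
--     i, n = 0, len(newPerfectData)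
--     while i < n:
--         k = len(newPerfectData[i])
--         j = i + 1
--         while j < n and len(newPerfectData[j]) == k:
--             j += 1
--         result.append(newPerfectData[i:j])
--         i = j
--     return result
-- ===== Notes on version B (the rewrite author's own statement) =====
-- stated objective: simpler
-- what changed: B replaces A's single fold that mutates the last bucket and keeps a parallel length list by a two-pointer scan: for each run start it advances a second index over the equal-length run and emits one slice per run.
import Mathlib
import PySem

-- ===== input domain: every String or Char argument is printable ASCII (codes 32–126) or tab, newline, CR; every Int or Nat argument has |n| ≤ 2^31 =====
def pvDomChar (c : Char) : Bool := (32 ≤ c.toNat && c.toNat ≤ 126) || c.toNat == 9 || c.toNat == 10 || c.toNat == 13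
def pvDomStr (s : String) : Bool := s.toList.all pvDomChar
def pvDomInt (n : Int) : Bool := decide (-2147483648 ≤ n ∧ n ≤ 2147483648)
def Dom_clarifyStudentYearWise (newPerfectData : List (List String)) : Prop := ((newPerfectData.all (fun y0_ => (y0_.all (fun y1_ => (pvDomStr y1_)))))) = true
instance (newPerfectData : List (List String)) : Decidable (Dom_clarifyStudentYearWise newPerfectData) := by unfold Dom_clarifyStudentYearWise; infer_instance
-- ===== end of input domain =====

-- B groups the consecutive equal-length runs by a two-pointer scan emitting one slice per run,
-- instead of A's fold that mutates the last bucket while tracking a parallel length list (objective: simpler).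

-- ===== PORT A =====
-- the loop body of A: state = (regularStudent, studentLengthList)
def pvStepA (st : List (List (List String)) × List Nat) (i : List String) :
    List (List (List String)) × List Nat :=
  if i.length = st.2.getLast! then
    (st.1.dropLast ++ [st.1.getLast! ++ [i]], st.2)
  else
    (st.1 ++ [[i]], st.2 ++ [i.length])

def clarifyStudentYearWise (newPerfectData : List (List String)) : List (List (List String)) :=
  match PySem.List.pyGet? newPerfectData 0 with
  | none => []  -- Python raises IndexError here (newPerfectData[0]); excluded by Pre_
  | some first =>
    (newPerfectData.foldl pvStepA ([[]], [first.length])).1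

-- ===== PORT B =====
-- inner while loop of B: length of the run of rows whose length equals k
def pvRunLen (k : Nat) : List (List String) → Nat
  | [] => 0
  | y :: ys => if y.length = k then 1 + pvRunLen k ys else 0

def clarifyStudentYearWise_alt (newPerfectData : List (List String)) : List (List (List String)) :=
  match newPerfectData with
  | [] => []
  | x :: xs =>
      let m := pvRunLen x.length xs
      (x :: xs.take m) :: clarifyStudentYearWise_alt (xs.drop m)
termination_by newPerfectData.length
decreasing_by
  simp only [List.length_drop, List.length_cons]
  omega

-- ===== PRECONDITION & SPEC =====
-- Pre_ excludes only the empty list, on which A raises IndexError (newPerfectData[0]).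
def Pre_clarifyStudentYearWise (newPerfectData : List (List String)) : Prop :=
  newPerfectData ≠ []
instance (newPerfectData : List (List String)) : Decidable (Pre_clarifyStudentYearWise newPerfectData) := by unfold Pre_clarifyStudentYearWise; infer_instance
def pvWitness_clarifyStudentYearWise : List (List String) := [["a"], ["b", "c"]]

def Spec_clarifyStudentYearWise (newPerfectData : List (List String)) (out : List (List (List String))) : Prop := out = clarifyStudentYearWise_alt newPerfectData
instance (newPerfectData : List (List String)) (out : List (List (List String))) : Decidable (Spec_clarifyStudentYearWise newPerfectData out) := by unfold Spec_clarifyStudentYearWise; infer_instance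

-- ===== CLAIM (what is proved, stated in full; the proofs are below) =====
def Claim_equal_clarifyStudentYearWise : Prop := ∀ (newPerfectData : List (List String)), Dom_clarifyStudentYearWise newPerfectData → Pre_clarifyStudentYearWise newPerfectData → Spec_clarifyStudentYearWise newPerfectData (clarifyStudentYearWise newPerfectData)

-- ===== LEMMAS AND PROOFS =====

theorem pvGetLastBang_concat {α : Type} [Inhabited α] (l : List α) (a : α) :
    (l ++ [a]).getLast! = a := by
  cases l with
  | nil => simp
  | cons b bs =>
    have h : (b :: (bs ++ [a])).getLast? = some a := by
      rw [← List.cons_append, List.getLast?_concat]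
    simp [h]

-- key invariant of A's fold: with regularStudent = done ++ [cur] and studentLengthList ending in k,
-- the fold produces 'done' followed by the run decomposition of the remaining rows.
theorem pvFoldA (xs : List (List String)) :
    ∀ (done : List (List (List String))) (cur : List (List String)) (sl : List Nat) (k : Nat),
    sl.getLast! = k →
    (xs.foldl pvStepA (done ++ [cur], sl)).1 =
      done ++ ((cur ++ xs.take (pvRunLen k xs)) ::
        clarifyStudentYearWise_alt (xs.drop (pvRunLen k xs))) := by
  induction xs with
  | nil => intro done cur sl k hk; simp [pvRunLen, clarifyStudentYearWise_alt]
  | cons x t ih =>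
    intro done cur sl k hk
    by_cases h : x.length = k
    · have hstep : pvStepA (done ++ [cur], sl) x = (done ++ [cur ++ [x]], sl) := by
        unfold pvStepA
        rw [hk, if_pos h]
        simp
      simp only [List.foldl_cons, hstep]
      rw [ih done (cur ++ [x]) sl k hk]
      simp [pvRunLen, h, Nat.add_comm, List.take_succ_cons, List.drop_succ_cons]
    · have hstep : pvStepA (done ++ [cur], sl) x =
          ((done ++ [cur]) ++ [[x]], sl ++ [x.length]) := by
        unfold pvStepA
        rw [hk, if_neg h]
      simp only [List.foldl_cons, hstep]
      rw [ih (done ++ [cur]) [x] (sl ++ [x.length]) x.length (pvGetLastBang_concat _ _)]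
      have halt : clarifyStudentYearWise_alt (x :: t) =
          (x :: t.take (pvRunLen x.length t)) ::
            clarifyStudentYearWise_alt (t.drop (pvRunLen x.length t)) := by
        rw [clarifyStudentYearWise_alt]
      simp [pvRunLen, h, halt]

-- ===== VERDICT (by name: the statement is the Claim_ definition above) =====
theorem clarifyStudentYearWise_spec : Claim_equal_clarifyStudentYearWise := by
  intro d _ hpre
  match d with
  | [] => exact absurd rfl hpre
  | h :: t =>
    unfold Spec_clarifyStudentYearWise clarifyStudentYearWise
    rw [PySem.List.pyGet?_zero_cons]
    show (List.foldl pvStepA ([[]], [h.length]) (h :: t)).1 = clarifyStudentYearWise_alt (h :: t)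
    have hf := pvFoldA (h :: t) [] [] [h.length] h.length (by simp)
    simp only [List.nil_append] at hf
    rw [hf, clarifyStudentYearWise_alt]
    simp [pvRunLen, Nat.add_comm, List.take_succ_cons, List.drop_succ_cons]
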